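-- pv_equiv track=rewrite | github.com/reo11/AtCoder | atcoder/PAST/past202004-open/d.py | aug
-- ===== SOURCE A (Python) =====
-- def aug(s):
--     outs = []
--     for i in range(2**len(s)):
--         out = ['' for _ in range(len(s))]
--         for j in range(len(s)):
--             if i >> j & 1:
--                 out[j] = '.'
--             else:
--                 out[j] = s[j]
--         outs.append("".join(out))
--     return outs
-- ===== SOURCE B (Python) =====
-- def aug(s):
--     if not s:
--         return ['']
--     rest = aug(s[1:])
--     return [c + r for r in rest for c in (s[0], '.')]
-- ===== Notes on version B (the rewrite author's own statement) =====
-- stated objective: simpler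
-- what changed: Replaced the bit-mask counter over range(2**len(s)) with an inner per-position loop by a structural recursion on the string that prepends the kept character or '.' to each variant of the tail, preserving A's position-0-varies-fastest order.
import Mathlib
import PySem

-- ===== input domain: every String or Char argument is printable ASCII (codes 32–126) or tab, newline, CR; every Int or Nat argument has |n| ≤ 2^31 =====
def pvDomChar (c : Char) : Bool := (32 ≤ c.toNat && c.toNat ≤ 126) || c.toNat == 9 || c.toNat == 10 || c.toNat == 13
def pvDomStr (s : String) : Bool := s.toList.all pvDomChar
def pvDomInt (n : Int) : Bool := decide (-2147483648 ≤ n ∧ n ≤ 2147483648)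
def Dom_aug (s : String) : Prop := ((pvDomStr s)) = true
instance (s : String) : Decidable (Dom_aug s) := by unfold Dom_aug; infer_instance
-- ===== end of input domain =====

-- B replaces A's bit-mask counter with a structural recursion on the string (prepend the
-- kept char or '.' to each variant of the tail), same output list in the same order; objective: simpler.

-- ===== PORT A =====
-- literal port of A: outer loop over range(2**len(s)) (len(s) ≥ 0, so the Int exponent is n.toNat
-- exactly), inner loop assigning out[j] from bit j of i; s[j] via PySem.Str.pyGet? (always in
-- range here, the `.elim ""` default is unreachable); `i >> j & 1` via Lean's Int >>> and
-- PySem.Int.band, which are Python-exact.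
def aug (s : String) : List String :=
  let n : Int := PySem.Str.len s
  (PySem.List.pyRange 0 ((2 : Int) ^ n.toNat) 1).foldl (fun outs i =>
    let out0 : List String := (PySem.List.pyRange 0 n 1).map (fun _ => "")
    let out := (PySem.List.pyRange 0 n 1).foldl (fun out j =>
      if PySem.Int.band (i >>> j.toNat) 1 ≠ 0 then
        out.set j.toNat "."
      else
        out.set j.toNat ((PySem.Str.pyGet? s j).elim "" (fun c => String.ofList [c]))) out0
    outs ++ [PySem.Str.join "" out]) []

-- ===== PORT B =====
-- literal port of Source B: recursion on the characters; `c + r` string prepend becomes cons.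
def augChars : List Char → List (List Char)
  | [] => [[]]
  | c :: cs => (augChars cs).flatMap (fun r => [c :: r, '.' :: r])

def aug_alt (s : String) : List String :=
  (augChars s.toList).map String.ofList

-- ===== PRECONDITION & SPEC =====
def Spec_aug (s : String) (out : List String) : Prop := out = aug_alt s
instance (s : String) (out : List String) : Decidable (Spec_aug s out) := by unfold Spec_aug; infer_instance

-- ===== CLAIM (what is proved, stated in full; the proofs are below) =====
def Claim_equal_aug : Prop := ∀ (s : String), Dom_aug s → Spec_aug s (aug s)

-- ===== LEMMAS AND PROOFS =====

-- the masked variant of cs selected by counter k (bit t of k ⇒ '.' at position t)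
def pvMask : List Char → Nat → List Char
  | [], _ => []
  | c :: cs, k => (if k % 2 = 1 then '.' else c) :: pvMask cs (k / 2)

theorem pvMask_length (cs : List Char) (k : Nat) : (pvMask cs k).length = cs.length := by
  induction cs generalizing k with
  | nil => rfl
  | cons c cs ih => simp [pvMask, ih]

theorem pvMask_getElem (cs : List Char) (k t : Nat) (ht : t < cs.length) :
    (pvMask cs k)[t]'(by rw [pvMask_length]; exact ht)
      = if (k >>> t) % 2 = 1 then '.' else cs[t] := by
  induction cs generalizing k t with
  | nil => simp at ht
  | cons c cs ih =>
    cases t with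
    | zero => simp [pvMask]
    | succ t =>
      have h2 : (k / 2) >>> t = k >>> (t + 1) := by
        rw [Nat.add_comm t 1, Nat.shiftRight_add, Nat.shiftRight_one]
      simpa [pvMask, h2] using ih (k / 2) t (by simpa using ht)

theorem pvRange_two_mul (m : Nat) :
    List.range (2 * m) = (List.range m).flatMap (fun t => [2 * t, 2 * t + 1]) := by
  induction m with
  | zero => rfl
  | succ m ih =>
    have h : 2 * (m + 1) = (2 * m + 1) + 1 := by omega
    rw [h, List.range_succ, List.range_succ, List.range_succ, ih]
    simp

theorem augChars_eq (cs : List Char) :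
    augChars cs = (List.range (2 ^ cs.length)).map (pvMask cs) := by
  induction cs with
  | nil => rfl
  | cons c cs ih =>
    have hm0 : ∀ t : Nat, pvMask (c :: cs) (2 * t) = c :: pvMask cs t := by
      intro t
      have h2 : 2 * t / 2 = t := by omega
      simp [pvMask, h2]
    have hm1 : ∀ t : Nat, pvMask (c :: cs) (2 * t + 1) = '.' :: pvMask cs t := by
      intro t
      have h1 : (2 * t + 1) % 2 = 1 := by omega
      have h2 : (2 * t + 1) / 2 = t := by omega
      simp [pvMask, h1, h2]
    have hpow : 2 ^ (c :: cs).length = 2 * 2 ^ cs.length := by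
      simp [List.length_cons, pow_succ]; ring
    rw [show augChars (c :: cs) = (augChars cs).flatMap (fun r => [c :: r, '.' :: r]) from rfl,
        ih, hpow, pvRange_two_mul]
    simp [List.flatMap_map, List.map_flatMap, hm0, hm1]

-- folding `out[j] := g j` over j = pre.length .. pre.length + out.length rewrites the suffix
theorem foldl_set_pyRange {α : Type} (g : Nat → α) (out : List α) :
    ∀ pre : List α,
      (PySem.List.pyRange (pre.length) (pre.length + out.length) 1).foldl
        (fun o (j : Int) => o.set j.toNat (g j.toNat)) (pre ++ out)
      = pre ++ (List.range out.length).map (fun t => g (pre.length + t)) := by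
  induction out with
  | nil => intro pre; rw [PySem.List.pyRange_one_eq_nil (by simp)]; simp
  | cons x xs ih =>
    intro pre
    have hlt : (pre.length : Int) < pre.length + (x :: xs).length := by
      push_cast [List.length_cons]; omega
    rw [PySem.List.pyRange_one_cons hlt]
    simp only [List.foldl_cons, Int.toNat_natCast]
    have hset : (pre ++ x :: xs).set pre.length (g pre.length)
        = (pre ++ [g pre.length]) ++ xs := by simp
    rw [hset]
    have harg1 : (pre.length : Int) + 1 = ((pre ++ [g pre.length]).length : Int) := by
      simp
    have harg2 : (pre.length : Int) + (x :: xs).length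
        = ((pre ++ [g pre.length]).length : Int) + xs.length := by
      push_cast [List.length_cons, List.length_append, List.length_nil]; omega
    rw [harg1, harg2, ih (pre ++ [g pre.length])]
    simp only [List.length_cons]
    rw [List.range_succ_eq_map, List.map_cons, List.map_map]
    simp only [List.length_append, List.length_cons, List.length_nil, List.append_assoc,
      List.singleton_append, Nat.add_zero]
    congr 1
    congr 1
    apply List.map_congr_left
    intro t _
    simp only [Function.comp_apply]
    congr 1
    omega

theorem join_singletons (l : List Char) :
    PySem.Str.join "" (l.map (fun c => String.ofList [c])) = String.ofList l := by
  rw [← String.toList_inj, PySem.Str.toList_join]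
  simp [List.map_map, Function.comp_def, PySem.Chars.join_nil_singletons]

theorem inner_eq (s : String) (k : Nat) :
    (PySem.List.pyRange 0 (PySem.Str.len s) 1).foldl
      (fun out (j : Int) =>
        if PySem.Int.band ((k : Int) >>> j.toNat) 1 ≠ 0 then
          out.set j.toNat "."
        else
          out.set j.toNat ((PySem.Str.pyGet? s j).elim "" (fun c => String.ofList [c])))
      ((PySem.List.pyRange 0 (PySem.Str.len s) 1).map (fun _ => ""))
    = (pvMask s.toList k).map (fun c => String.ofList [c]) := by
  set g : Nat → String := fun t =>
    if PySem.Int.band ((k : Int) >>> t) 1 ≠ 0 then "."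
    else (PySem.Str.pyGet? s (t : Int)).elim "" (fun c => String.ofList [c]) with hg
  set out0 : List String := (PySem.List.pyRange 0 (PySem.Str.len s) 1).map (fun _ => "") with hout0
  have hcongr : (PySem.List.pyRange 0 (PySem.Str.len s) 1).foldl
      (fun out (j : Int) =>
        if PySem.Int.band ((k : Int) >>> j.toNat) 1 ≠ 0 then
          out.set j.toNat "."
        else
          out.set j.toNat ((PySem.Str.pyGet? s j).elim "" (fun c => String.ofList [c]))) out0
      = (PySem.List.pyRange 0 (PySem.Str.len s) 1).foldl
        (fun o (j : Int) => o.set j.toNat (g j.toNat)) out0 := by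
    apply PySem.List.foldl_congr_mem
    intro acc j hj
    have h0 : (0 : Int) ≤ j := (PySem.List.mem_pyRange_one.mp hj).1
    obtain ⟨m, rfl⟩ : ∃ m : Nat, j = (m : Int) := ⟨j.toNat, (Int.toNat_of_nonneg h0).symm⟩
    simp only [hg, Int.toNat_natCast]
    split <;> rfl
  rw [hcongr]
  have h0 := foldl_set_pyRange g out0 []
  simp only [List.length_nil, List.nil_append, Nat.cast_zero, Int.zero_add, Nat.zero_add] at h0
  have hlen : (out0.length : Int) = PySem.Str.len s := by
    rw [hout0]; simp [PySem.List.length_pyRange_one, PySem.Str.len_eq]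
  rw [show (PySem.List.pyRange 0 (PySem.Str.len s) 1)
      = PySem.List.pyRange 0 (out0.length : Int) 1 from by rw [hlen], h0]
  have hlen2 : out0.length = s.toList.length := by
    have := hlen; rw [PySem.Str.len_eq] at this; exact_mod_cast this
  apply List.ext_getElem
  · simp [hlen2, pvMask_length]
  · intro t h1 h2
    simp only [List.getElem_map, List.getElem_range]
    have ht : t < s.toList.length := by simpa [hlen2] using h1
    rw [pvMask_getElem s.toList k t ht, hg]
    have hsh : ((k : Int) >>> t) = ((k >>> t : Nat) : Int) := rfl
    have hb := PySem.Int.band_natCast (k >>> t) 1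
    rw [Nat.and_one_is_mod] at hb
    simp only [Nat.cast_one] at hb
    have hget : PySem.Str.pyGet? s (t : Int) = some (s.toList[t]) := by
      rw [PySem.Str.pyGet?_natCast]; exact List.getElem?_eq_getElem ht
    simp only [hsh, hb, hget]
    rcases Nat.mod_two_eq_zero_or_one (k >>> t) with hpar | hpar <;>
      simp [hpar]

-- ===== VERDICT (by name: the statement is the Claim_ definition above) =====
theorem aug_spec : Claim_equal_aug := by
  intro s _
  show aug s = aug_alt s
  simp only [aug, aug_alt]
  rw [PySem.List.foldl_append_singleton_eq_map, List.nil_append]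
  have hn : (PySem.Str.len s).toNat = s.toList.length := by
    rw [PySem.Str.len_eq]; exact Int.toNat_natCast _
  have hpow : ((2 : Int) ^ (PySem.Str.len s).toNat) = ((2 ^ s.toList.length : Nat) : Int) := by
    rw [hn]; push_cast; ring
  rw [hpow, PySem.List.pyRange_zero_nat, List.map_map, augChars_eq, List.map_map]
  apply List.map_congr_left
  intro k _
  simp only [Function.comp]
  rw [inner_eq s k, join_singletons]
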